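-- pv_equiv track=rewrite | github.com/MarkusNeusinger/pyplots | plots/barcode-code128/implementations/pygal.py | encode_code128b
-- ===== SOURCE A (Python) =====
-- CODE128B_CHARS = " !\"#$%&'()*+,-./0123456789:;<=>?@ABCDEFGHIJKLMNOPQRSTUVWXYZ[\\]^_`abcdefghijklmnopqrstuvwxyz{|}~"
--
-- def encode_code128b(text):
--     """Encode text using Code 128B and return list of values"""
--     values = [104]  # START_B
--     for char in text:
--         if char in CODE128B_CHARS:
--             values.append(CODE128B_CHARS.index(char))
--         else:
--             values.append(0)  # Space for unsupported chars
--
--     # Calculate checksum (modulo 103)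
--     checksum = values[0]
--     for i, val in enumerate(values[1:], 1):
--         checksum += i * val
--     checksum = checksum % 103
--     values.append(checksum)
--     values.append(106)  # STOP
--     return values
-- ===== SOURCE B (Python) =====
-- def encode_code128b(text):
--     """Encode text using Code 128B and return list of values"""
--     # Code 128B index of a printable ASCII char is ord(c) - 32; others map to 0 (space).
--     vals = [(o - 32 if 32 <= o <= 126 else 0) for o in map(ord, text)]
--     # Checksum 104 + sum(i * v_i) computed without positional weights:
--     # sum(i * v_i) equals the sum of all suffix sums, accumulated right-to-left.
--     total, suffix = 104, 0
--     for v in reversed(vals):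
--         suffix += v
--         total += suffix
--     return [104] + vals + [total % 103, 106]
-- ===== Notes on version B (the rewrite author's own statement) =====
-- stated objective: alternative
-- what changed: B maps each char to its code by the arithmetic identity ord-32 (no table scan), and computes the weighted checksum sum(i*v_i) without any positional weights or enumeration: it accumulates suffix sums in a single right-to-left scan, using the identity sum(i*v_i) = sum of all suffix sums.
import Mathlib
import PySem

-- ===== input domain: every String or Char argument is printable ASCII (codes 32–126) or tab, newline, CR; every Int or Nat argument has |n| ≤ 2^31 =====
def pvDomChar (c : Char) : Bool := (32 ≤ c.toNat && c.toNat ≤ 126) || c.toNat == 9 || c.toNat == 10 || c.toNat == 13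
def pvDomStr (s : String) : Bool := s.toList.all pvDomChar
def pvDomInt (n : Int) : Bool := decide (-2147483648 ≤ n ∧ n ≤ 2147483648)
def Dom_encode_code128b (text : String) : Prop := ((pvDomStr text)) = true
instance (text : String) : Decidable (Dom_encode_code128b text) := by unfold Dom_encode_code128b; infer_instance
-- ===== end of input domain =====

-- B replaces A's table scans by ord-32 arithmetic and computes the weighted checksum with no
-- positional weights at all: a right-to-left scan accumulating suffix sums (alternative algorithm).

-- ===== PORT A =====
def CODE128B_CHARS : String := " !\"#$%&'()*+,-./0123456789:;<=>?@ABCDEFGHIJKLMNOPQRSTUVWXYZ[\\]^_`abcdefghijklmnopqrstuvwxyz{|}~"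

def encode_code128b (text : String) : List Int :=
  let values : List Int := text.toList.foldl (fun vs char =>
    if PySem.Str.isIn (String.mk [char]) CODE128B_CHARS = true then
      vs ++ [PySem.Str.find CODE128B_CHARS (String.mk [char])]
    else
      vs ++ [0]) [104]
  let checksum : Int := (PySem.List.enumerate (PySem.List.slice values (some 1) none) 1).foldl
    (fun acc p => acc + p.1 * p.2) (PySem.List.pyGetD values 0 0)
  values ++ [PySem.Int.mod checksum 103, 106]

-- ===== PORT B =====
def encode_code128b_alt (text : String) : List Int :=
  let vals : List Int := text.toList.map (fun c =>
    if 32 ≤ c.toNat ∧ c.toNat ≤ 126 then (c.toNat : Int) - 32 else 0)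
  let st := vals.reverse.foldl
    (fun (st : Int × Int) v => (st.1 + (st.2 + v), st.2 + v)) (104, 0)
  [104] ++ vals ++ [PySem.Int.mod st.1 103, 106]

-- ===== PRECONDITION & SPEC =====
def Spec_encode_code128b (text : String) (out : List Int) : Prop := out = encode_code128b_alt text
instance (text : String) (out : List Int) : Decidable (Spec_encode_code128b text out) := by unfold Spec_encode_code128b; infer_instance

-- ===== CLAIM =====
def Claim_equal_encode_code128b : Prop := ∀ (text : String), Dom_encode_code128b text → Spec_encode_code128b text (encode_code128b text)

-- ===== LEMMAS AND PROOFS =====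

-- B's per-character value
def pvVal (c : Char) : Int := if 32 ≤ c.toNat ∧ c.toNat ≤ 126 then (c.toNat : Int) - 32 else 0

set_option maxRecDepth 10000 in
theorem pvTable : ∀ n : Fin 127, 32 ≤ n.1 →
    (if PySem.Str.isIn (String.mk [Char.ofNat n.1]) CODE128B_CHARS = true then
      PySem.Str.find CODE128B_CHARS (String.mk [Char.ofNat n.1]) else 0) = (n.1 : Int) - 32 := by
  decide

set_option maxRecDepth 20000 in
theorem pvCharVal (c : Char) :
    (if PySem.Str.isIn (String.mk [c]) CODE128B_CHARS = true then
      PySem.Str.find CODE128B_CHARS (String.mk [c]) else 0) = pvVal c := by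
  unfold pvVal
  by_cases h : 32 ≤ c.toNat ∧ c.toNat ≤ 126
  · rw [if_pos h]
    obtain ⟨h1, h2⟩ := h
    have hc : Char.ofNat c.toNat = c := Char.ofNat_toNat c
    have ht := pvTable ⟨c.toNat, by omega⟩ h1
    simpa [hc] using ht
  · rw [if_neg h, if_neg]
    have hall : CODE128B_CHARS.toList.all
        (fun x => decide (32 ≤ x.toNat) && decide (x.toNat ≤ 126)) = true := by decide
    intro hin
    have hinf : (String.mk [c]).toList <:+: CODE128B_CHARS.toList :=
      (PySem.Str.isIn_iff_infix _ _).mp hin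
    have hl : (String.mk [c]).toList = [c] := Eq.symm (String.ofList_eq.mp rfl)
    rw [hl] at hinf
    have hmem : c ∈ CODE128B_CHARS.toList := hinf.subset (List.mem_singleton_self c)
    have hb := List.all_eq_true.mp hall c hmem
    simp at hb
    exact h hb

-- weighted sum of a value list: Σ i * v_i with 1-based positions
def pvW (vs : List Int) : Int :=
  ((PySem.List.enumerate vs 1).map (fun p => p.1 * p.2)).sum

theorem pvW_append_single (vs : List Int) (v : Int) :
    pvW (vs ++ [v]) = pvW vs + ((vs.length : Int) + 1) * v := by
  unfold pvW
  rw [PySem.List.enumerate_append]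
  simp [PySem.List.enumerate_cons, PySem.List.enumerate_nil, add_comm]

-- B's suffix-sum scan computes the same weighted sum: the first component of the fold over
-- ws equals t + |ws|*s + (weighted sum of ws.reverse), the second is s + sum ws.
theorem pvSuffixFold (ws : List Int) (t s : Int) :
    ws.foldl (fun (st : Int × Int) v => (st.1 + (st.2 + v), st.2 + v)) (t, s)
      = (t + (ws.length : Int) * s + pvW ws.reverse, s + ws.sum) := by
  induction ws generalizing t s with
  | nil => simp [pvW, PySem.List.enumerate_nil]
  | cons v ws ih =>
    simp only [List.foldl_cons, ih, List.reverse_cons, pvW_append_single,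
      List.length_cons, List.sum_cons, List.length_reverse]
    rw [Prod.mk.injEq]
    refine ⟨by push_cast; ring, by ring⟩

-- ===== VERDICT =====
theorem encode_code128b_spec : Claim_equal_encode_code128b := by
  intro text _
  show encode_code128b text = encode_code128b_alt text
  unfold encode_code128b encode_code128b_alt
  have hval : (fun (vs : List Int) (c : Char) =>
      if PySem.Str.isIn (String.mk [c]) CODE128B_CHARS = true then
        vs ++ [PySem.Str.find CODE128B_CHARS (String.mk [c])]
      else vs ++ [0]) = fun vs c => vs ++ [pvVal c] := by
    funext vs c
    rw [← pvCharVal c]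
    split <;> rfl
  simp only [hval]
  rw [PySem.List.foldl_append_singleton_eq_map]
  have hB : (fun c => if 32 ≤ c.toNat ∧ c.toNat ≤ 126 then ((c.toNat : Int)) - 32 else 0) = pvVal := rfl
  rw [hB, pvSuffixFold]
  have hslice : PySem.List.slice (([104] : List Int) ++ text.toList.map pvVal) (some 1) none
      = text.toList.map pvVal := by
    rw [PySem.List.slice_from]
    · rfl
    · simp
  rw [hslice]
  have hget : PySem.List.pyGetD (([104] : List Int) ++ text.toList.map pvVal) 0 0 = 104 := by
    simp [PySem.List.pyGetD, PySem.List.pyGet?, PySem.List.pyIdx?]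
  rw [hget]
  have hsum : List.foldl (fun (acc : Int) (p : Int × Int) => acc + p.1 * p.2) 104
      (PySem.List.enumerate (text.toList.map pvVal) 1)
      = 104 + pvW (text.toList.map pvVal) := by
    exact PySem.List.foldl_add _ (fun p : Int × Int => p.1 * p.2) 104
  rw [hsum]
  simp [List.reverse_reverse]
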